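-- pv_equiv track=rewrite | github.com/CentreForDigitalHumanities/wisselwerking | backend/registration/management/commands/import.py | format_last_name
-- ===== SOURCE A (Python) =====
-- from typing import Dict, List, Tuple, Optional
--
-- def capitalize(value: str) -> str:
--     output = ""
--     separators = [" ", "-", ".", "'"]
--     capitalize_next = True
--     prev = ""
--
--     for char in value:
--         if char in separators:
--             capitalize_next = True
--         elif capitalize_next:
--             capitalize_next = False
--             char = char.upper()
--         else:
--             if prev == "I" and char.lower() == "j":
--                 # capitalize IJ correctly in Dutch
--                 char = char.upper()
--             else:
--                 char = char.lower()
--         output += char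
--         prev = char
--
--     return output
--
-- def format_last_name(value: str) -> Tuple[str, str]:
--     prefix_parts = []
--     surname_parts = []
--     for part in value.strip().split(" "):
--         if not surname_parts and part.lower() in [
--             "van",
--             "von",
--             "de",
--             "der",
--             "den",
--             "die",
--         ]:
--             prefix_parts.append(part.lower())
--         else:
--             surname_parts.append(part)
--
--     return (str.join(" ", prefix_parts), capitalize(str.join(" ", surname_parts)))
-- ===== SOURCE B (Python) =====
-- from typing import Tuple
--
-- PREFIX_WORDS = {"van", "von", "de", "der", "den", "die"}
--
-- def capitalize(value: str) -> str:
--     # stateless positional rule: each output char depends only on the char and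
--     # the two original chars before it (sentinel-padded), no mutable flag/prev state
--     seps = " -.'"
--     out = []
--     for c, p1, p2 in zip(value, " " + value, "  " + value):
--         if c in seps:
--             out.append(c)
--         elif p1 in seps:
--             out.append(c.upper())
--         elif p2 in seps and p1 in "iI" and c in "jJ":
--             # capitalize IJ correctly in Dutch
--             out.append(c.upper())
--         else:
--             out.append(c.lower())
--     return "".join(out)
--
-- def format_last_name(value: str) -> Tuple[str, str]:
--     def split_prefix(s: str) -> Tuple[list, str]:
--         word, _, rest = s.partition(" ")
--         if word.lower() in PREFIX_WORDS:
--             pre, surname = split_prefix(rest)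
--             return [word.lower()] + pre, surname
--         return [], s
--
--     prefix, surname = split_prefix(value.strip())
--     return " ".join(prefix), capitalize(surname)
-- ===== Notes on version B (the rewrite author's own statement) =====
-- stated objective: alternative
-- what changed: B never builds the prefix/surname lists of A's flag loop: it peels prefix words off the string by recursive str.partition and keeps the surname as one unsplit string, and capitalize is rewritten as a stateless positional rule over (char, prev, prev2) triples from zipping the string with two shifted copies instead of A's mutable capitalize_next/prev state machine.
import Mathlib
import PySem

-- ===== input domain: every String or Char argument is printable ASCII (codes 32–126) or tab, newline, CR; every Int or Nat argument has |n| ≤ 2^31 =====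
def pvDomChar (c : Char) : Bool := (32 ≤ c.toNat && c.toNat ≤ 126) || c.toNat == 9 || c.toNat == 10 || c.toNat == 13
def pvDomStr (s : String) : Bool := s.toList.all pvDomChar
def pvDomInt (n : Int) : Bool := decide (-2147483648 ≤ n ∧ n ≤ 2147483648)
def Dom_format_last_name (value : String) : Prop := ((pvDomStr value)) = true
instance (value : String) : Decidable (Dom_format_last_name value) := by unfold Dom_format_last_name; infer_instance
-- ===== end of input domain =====

-- B peels prefix words off the string by recursive str.partition (no parts/surname lists)
-- and rewrites capitalize as a stateless positional rule over (char, prev, prev2) zip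
-- triples instead of A's mutable-flag loop (objective: alternative, same cost).

-- ===== PORT A =====
-- A's capitalize: one pass with mutable state (output, capitalize_next, prev)
def capStepA (st : List Char × Bool × List Char) (c : Char) : List Char × Bool × List Char :=
  let (output, capNext, prev) := st
  if c ∈ [' ', '-', '.', '\''] then
    (output ++ [c], true, [c])
  else if capNext then
    let c' := PySem.Chars.upperChar c
    (output ++ [c'], false, [c'])
  else
    let c' := if prev = ['I'] ∧ PySem.Chars.lowerChar c = 'j'
              then PySem.Chars.upperChar c else PySem.Chars.lowerChar c
    (output ++ [c'], false, [c'])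

def pyCapitalize (value : String) : String :=
  String.ofList (value.toList.foldl capStepA ([], true, [])).1

def flnStep (st : List String × List String) (part : String) : List String × List String :=
  if st.2.isEmpty ∧ PySem.Str.lower part ∈ ["van", "von", "de", "der", "den", "die"]
  then (st.1 ++ [PySem.Str.lower part], st.2)
  else (st.1, st.2 ++ [part])

def format_last_name (value : String) : String × String :=
  let parts := (PySem.Str.split? (PySem.Str.strip value) " ").getD []
  let acc := parts.foldl flnStep ([], [])
  (PySem.Str.join " " acc.1, pyCapitalize (PySem.Str.join " " acc.2))

-- ===== PORT B =====
-- B's capitalize: each output char is a pure function of (c, prev char, char before that),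
-- obtained by zipping the string with two sentinel-padded shifted copies
def pyCapStep (c p1 p2 : Char) : Char :=
  if c ∈ [' ', '-', '.', '\''] then c
  else if p1 ∈ [' ', '-', '.', '\''] then PySem.Chars.upperChar c
  else if p2 ∈ [' ', '-', '.', '\''] ∧ (p1 = 'i' ∨ p1 = 'I') ∧ (c = 'j' ∨ c = 'J')
  then PySem.Chars.upperChar c
  else PySem.Chars.lowerChar c

def pyCapitalizeAlt (value : String) : String :=
  String.ofList
    (((value.toList.zip (' ' :: value.toList)).zip (' ' :: ' ' :: value.toList)).map
      (fun t => pyCapStep t.1.1 t.1.2 t.2))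

def charPrefixes : List (List Char) :=
  [['v','a','n'], ['v','o','n'], ['d','e'], ['d','e','r'], ['d','e','n'], ['d','i','e']]

-- B's split_prefix: word, _, rest = s.partition(" "); recurse while word is a prefix word
def splitPrefixB (s : List Char) : List (List Char) × List Char :=
  let word := s.takeWhile (fun c => c ≠ ' ')
  if hp : PySem.Chars.lower word ∈ charPrefixes then
    let res := splitPrefixB ((s.dropWhile (fun c => c ≠ ' ')).drop 1)
    (PySem.Chars.lower word :: res.1, res.2)
  else ([], s)
termination_by s.length
decreasing_by
  have h' : PySem.Chars.lower (s.takeWhile (fun c => decide (c ≠ ' '))) ∈ charPrefixes := hp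
  have hw : s.takeWhile (fun c => decide (c ≠ ' ')) ≠ [] := by
    intro hnil
    rw [hnil] at h'
    exact absurd h' (by decide)
  have hsplit := congrArg List.length (List.takeWhile_append_dropWhile
    (p := fun c => decide (c ≠ ' ')) (l := s))
  rw [List.length_append] at hsplit
  have hpos : 0 < (s.takeWhile (fun c => decide (c ≠ ' '))).length :=
    List.length_pos_iff.mpr hw
  rw [List.length_drop]
  omega

def format_last_name_alt (value : String) : String × String :=
  let res := splitPrefixB (PySem.Str.strip value).toList
  (PySem.Str.join " " (res.1.map String.ofList), pyCapitalizeAlt (String.ofList res.2))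

-- ===== PRECONDITION & SPEC =====
def Spec_format_last_name (value : String) (out : String × String) : Prop := out = format_last_name_alt value
instance (value : String) (out : String × String) : Decidable (Spec_format_last_name value out) := by unfold Spec_format_last_name; infer_instance

-- ===== CLAIM (what is proved, stated in full; the proofs are below) =====
def Claim_equal_format_last_name : Prop := ∀ (value : String), Dom_format_last_name value → Spec_format_last_name value (format_last_name value)

-- ===== LEMMAS AND PROOFS =====

-- ---- character-level facts ----
lemma char_eq_iff_toNat (a b : Char) : a = b ↔ a.toNat = b.toNat :=
  ⟨fun h => h ▸ rfl, fun h => Char.ext (UInt32.toNat_inj.mp h)⟩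

lemma upperChar_eq_I_iff (c : Char) : PySem.Chars.upperChar c = 'I' ↔ (c = 'i' ∨ c = 'I') := by
  unfold PySem.Chars.upperChar PySem.Chars.islower
  by_cases h : ('a' ≤ c ∧ c ≤ 'z')
  · have h1 : 97 ≤ c.toNat := h.1
    have h2 : c.toNat ≤ 122 := h.2
    have hv : (c.toNat - 32).isValidChar := Or.inl (by omega)
    simp only [h.1, h.2, decide_true, Bool.and_self, if_true, char_eq_iff_toNat]
    rw [Char.toNat_ofNat, if_pos hv]
    have e1 : ('I').toNat = 73 := rfl
    have e2 : ('i').toNat = 105 := rfl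
    omega
  · have h' : ¬(decide ('a' ≤ c) && decide (c ≤ 'z')) = true := by
      simp only [Bool.and_eq_true, decide_eq_true_eq]; exact h
    rw [if_neg h']
    constructor
    · exact Or.inr
    · rintro (rfl | rfl)
      · exact absurd ⟨by decide, by decide⟩ h
      · rfl

lemma lowerChar_ne_I (c : Char) : PySem.Chars.lowerChar c ≠ 'I' := by
  unfold PySem.Chars.lowerChar PySem.Chars.isupper
  by_cases h : ('A' ≤ c ∧ c ≤ 'Z')
  · have h1 : 65 ≤ c.toNat := h.1
    have h2 : c.toNat ≤ 90 := h.2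
    have hv : (c.toNat + 32).isValidChar := Or.inl (by omega)
    simp only [h.1, h.2, decide_true, Bool.and_self, if_true, ne_eq, char_eq_iff_toNat]
    rw [Char.toNat_ofNat, if_pos hv]
    have e1 : ('I').toNat = 73 := rfl
    omega
  · have h' : ¬(decide ('A' ≤ c) && decide (c ≤ 'Z')) = true := by
      simp only [Bool.and_eq_true, decide_eq_true_eq]; exact h
    rw [if_neg h']
    rintro rfl
    exact h ⟨by decide, by decide⟩

lemma lowerChar_eq_j_iff (c : Char) : PySem.Chars.lowerChar c = 'j' ↔ (c = 'j' ∨ c = 'J') := by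
  unfold PySem.Chars.lowerChar PySem.Chars.isupper
  by_cases h : ('A' ≤ c ∧ c ≤ 'Z')
  · have h1 : 65 ≤ c.toNat := h.1
    have h2 : c.toNat ≤ 90 := h.2
    have hv : (c.toNat + 32).isValidChar := Or.inl (by omega)
    simp only [h.1, h.2, decide_true, Bool.and_self, if_true, char_eq_iff_toNat]
    rw [Char.toNat_ofNat, if_pos hv]
    have e1 : ('j').toNat = 106 := rfl
    have e2 : ('J').toNat = 74 := rfl
    omega
  · have h' : ¬(decide ('A' ≤ c) && decide (c ≤ 'Z')) = true := by
      simp only [Bool.and_eq_true, decide_eq_true_eq]; exact h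
    rw [if_neg h']
    constructor
    · exact Or.inl
    · rintro (rfl | rfl)
      · rfl
      · exact absurd ⟨by decide, by decide⟩ h

-- ---- capitalize: A's state machine = B's positional rule ----
lemma cap_loop (l : List Char) (out : List Char) (capN : Bool) (prevT : List Char) (p1 p2 : Char)
    (h1 : capN = decide (p1 ∈ ([' ', '-', '.', '\''] : List Char)))
    (h2 : capN = false →
      (prevT = ['I'] ↔ (p2 ∈ ([' ', '-', '.', '\''] : List Char) ∧ (p1 = 'i' ∨ p1 = 'I')))) :
    (l.foldl capStepA (out, capN, prevT)).1 =
      out ++ ((l.zip (p1 :: l)).zip (p2 :: p1 :: l)).map (fun t => pyCapStep t.1.1 t.1.2 t.2) := by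
  induction l generalizing out capN prevT p1 p2 with
  | nil => simp
  | cons c rest ih =>
    simp only [List.zip_cons_cons, List.map_cons, List.foldl_cons]
    by_cases hc : c ∈ ([' ', '-', '.', '\''] : List Char)
    · have hstep : capStepA (out, capN, prevT) c = (out ++ [c], true, [c]) := by
        simp [capStepA, hc]
      rw [hstep, ih (out ++ [c]) true [c] c p1 (by simp [hc]) (by intro h; cases h)]
      simp [pyCapStep, hc]
    · by_cases hcap : capN = true
      · have hp1 : p1 ∈ ([' ', '-', '.', '\''] : List Char) := by
          rw [hcap] at h1; exact of_decide_eq_true h1.symm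
        have hstep : capStepA (out, capN, prevT) c =
            (out ++ [PySem.Chars.upperChar c], false, [PySem.Chars.upperChar c]) := by
          simp [capStepA, hc, hcap]
        rw [hstep, ih (out ++ [PySem.Chars.upperChar c]) false [PySem.Chars.upperChar c] c p1
          (by simp [hc])
          (by
            intro _
            constructor
            · intro hI
              have : PySem.Chars.upperChar c = 'I' := by
                simpa using hI
              exact ⟨hp1, (upperChar_eq_I_iff c).mp this⟩
            · rintro ⟨_, hci⟩
              have : PySem.Chars.upperChar c = 'I' := (upperChar_eq_I_iff c).mpr hci
              rw [this])]
        simp [pyCapStep, hc, hp1]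
      · have hcapf : capN = false := by cases capN <;> simp_all
        have hp1 : p1 ∉ ([' ', '-', '.', '\''] : List Char) := by
          rw [hcapf] at h1
          exact of_decide_eq_false h1.symm
        have hprev := h2 hcapf
        have hcond : (prevT = ['I'] ∧ PySem.Chars.lowerChar c = 'j') ↔
            (p2 ∈ ([' ', '-', '.', '\''] : List Char) ∧ (p1 = 'i' ∨ p1 = 'I') ∧ (c = 'j' ∨ c = 'J')) := by
          rw [hprev, lowerChar_eq_j_iff, and_assoc]
        set c' : Char := if prevT = ['I'] ∧ PySem.Chars.lowerChar c = 'j'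
          then PySem.Chars.upperChar c else PySem.Chars.lowerChar c with hc'
        have hstep : capStepA (out, capN, prevT) c = (out ++ [c'], false, [c']) := by
          simp only [capStepA, hc, hcapf]
          simp only [if_false, Bool.false_eq_true]
          rw [hc']
        have hcI : c' ≠ 'I' := by
          rw [hc']
          split
          · rename_i hcnd
            have hcj : c = 'j' ∨ c = 'J' := (lowerChar_eq_j_iff c).mp hcnd.2
            intro hI
            rcases (upperChar_eq_I_iff c).mp hI with rfl | rfl <;> simp at hcj
          · exact lowerChar_ne_I c
        rw [hstep, ih (out ++ [c']) false [c'] c p1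
          (by simp [hc])
          (by
            intro _
            constructor
            · intro hI
              exact absurd (by simpa using hI) hcI
            · rintro ⟨hp1', _⟩
              exact absurd hp1' hp1)]
        have hpc : pyCapStep c p1 p2 = c' := by
          simp only [pyCapStep, hc, hp1, if_false]
          rw [hc']
          rcases Classical.em (prevT = ['I'] ∧ PySem.Chars.lowerChar c = 'j') with hyes | hno
          · rw [if_pos (hcond.mp hyes), if_pos hyes]
          · rw [if_neg (fun hx => hno (hcond.mpr hx)), if_neg hno]
        rw [hpc]
        simp

lemma capitalize_eq (s : String) : pyCapitalize s = pyCapitalizeAlt s := by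
  unfold pyCapitalize pyCapitalizeAlt
  rw [cap_loop s.toList [] true [] ' ' ' ' (by decide) (by intro h; cases h)]
  simp

-- ---- splitting on ' ': a structural model of PySem.Chars.splitOn ----
def mySplit : List Char → List (List Char)
  | [] => [[]]
  | c :: cs => if c = ' ' then [] :: mySplit cs else (mySplit cs).modifyHead (c :: ·)

lemma mySplit_ne_nil (cs : List Char) : mySplit cs ≠ [] := by
  induction cs with
  | nil => simp [mySplit]
  | cons c cs ih =>
    simp only [mySplit]
    split
    · simp
    · cases h : mySplit cs with
      | nil => exact absurd h ih
      | cons a t => simp [List.modifyHead]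

lemma splitOn_go_eq (l : List Char) : ∀ (fuel : Nat), l.length ≤ fuel → ∀ (cur : List Char) (acc : List (List Char)),
    PySem.Chars.splitOn.go [' '] fuel l cur acc =
      acc.reverse ++ (mySplit l).modifyHead (fun x => cur.reverse ++ x) := by
  induction l with
  | nil =>
    intro fuel _ cur acc
    cases fuel with
    | zero => simp [PySem.Chars.splitOn.go, mySplit, List.modifyHead]
    | succ f => simp [PySem.Chars.splitOn.go, mySplit, List.modifyHead]
  | cons c rest ih =>
    intro fuel hf cur acc
    cases fuel with
    | zero => simp at hf
    | succ f =>
      have hrw : PySem.Chars.splitOn.go [' '] (f + 1) (c :: rest) cur acc =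
          if [' '].isPrefixOf (c :: rest)
          then PySem.Chars.splitOn.go [' '] f (List.drop [' '].length (c :: rest)) [] (cur.reverse :: acc)
          else PySem.Chars.splitOn.go [' '] f rest (c :: cur) acc := rfl
      rw [hrw]
      have hlen : rest.length ≤ f := by simpa using hf
      by_cases hc : c = ' '
      · subst hc
        rw [if_pos (by simp [List.isPrefixOf])]
        rw [show List.drop [' '].length (' ' :: rest) = rest from rfl]
        rw [ih f hlen [] (cur.reverse :: acc)]
        cases h : mySplit rest with
        | nil => exact absurd h (mySplit_ne_nil rest)
        | cons a t => simp [mySplit, List.modifyHead, h]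
      · rw [if_neg (by simp [List.isPrefixOf, Ne.symm hc])]
        rw [ih f hlen (c :: cur) acc]
        cases h : mySplit rest with
        | nil => exact absurd h (mySplit_ne_nil rest)
        | cons a t => simp [mySplit, hc, List.modifyHead, h]

lemma splitOn_eq_mySplit (cs : List Char) : PySem.Chars.splitOn cs [' '] = mySplit cs := by
  unfold PySem.Chars.splitOn
  rw [splitOn_go_eq cs (cs.length + 1) (by omega) [] []]
  cases h : mySplit cs with
  | nil => exact absurd h (mySplit_ne_nil cs)
  | cons a t => simp

lemma join_mySplit (cs : List Char) : PySem.Chars.join [' '] (mySplit cs) = cs := by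
  induction cs with
  | nil => rfl
  | cons c rest ih =>
    by_cases hc : c = ' '
    · subst hc
      cases h : mySplit rest with
      | nil => exact absurd h (mySplit_ne_nil rest)
      | cons a t =>
        rw [h] at ih
        have hm : mySplit (' ' :: rest) = [] :: mySplit rest := by simp [mySplit]
        rw [hm, h, PySem.Chars.join_cons_cons, ih]
        simp
    · cases h : mySplit rest with
      | nil => exact absurd h (mySplit_ne_nil rest)
      | cons a t =>
        rw [h] at ih
        simp only [mySplit, hc, if_false, h, List.modifyHead]
        cases t with
        | nil =>
          simp only [PySem.Chars.join_singleton] at ih ⊢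
          rw [ih]
        | cons b u =>
          rw [PySem.Chars.join_cons_cons] at ih ⊢
          rw [← ih]
          simp

lemma mySplit_eq_cons (cs : List Char) :
    mySplit cs = cs.takeWhile (fun c => decide (c ≠ ' ')) ::
      (if cs.dropWhile (fun c => decide (c ≠ ' ')) = [] then []
       else mySplit ((cs.dropWhile (fun c => decide (c ≠ ' '))).drop 1)) := by
  induction cs with
  | nil => simp [mySplit]
  | cons c rest ih =>
    by_cases hc : c = ' '
    · subst hc
      simp [mySplit, List.takeWhile, List.dropWhile]
    · simp only [mySplit, hc, if_false, List.takeWhile_cons, List.dropWhile_cons]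
      simp only [hc, decide_true, ne_eq, not_false_iff, if_true, decide_not]
      rw [ih]
      simp [List.modifyHead]

-- ---- B's recursion computes take/drop at the prefix-run boundary of mySplit ----
def countPrefixC : List (List Char) → Nat
  | [] => 0
  | w :: r => if PySem.Chars.lower w ∈ charPrefixes then countPrefixC r + 1 else 0

lemma splitPrefixB_eq (cs : List Char) :
    splitPrefixB cs =
      (((mySplit cs).take (countPrefixC (mySplit cs))).map PySem.Chars.lower,
       PySem.Chars.join [' '] ((mySplit cs).drop (countPrefixC (mySplit cs)))) := by
  induction cs using splitPrefixB.induct with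
  | case1 s word hmem ih =>
    rw [splitPrefixB]
    by_cases hd : s.dropWhile (fun c => decide (c ≠ ' ')) = []
    · have hm : mySplit s = [s.takeWhile (fun c => decide (c ≠ ' '))] := by
        rw [mySplit_eq_cons s, if_pos hd]
      have hmem' : PySem.Chars.lower (s.takeWhile (fun c => decide (c ≠ ' '))) ∈ charPrefixes := hmem
      have hnil : splitPrefixB [] = ([], []) := by rw [splitPrefixB]; rfl
      rw [hd, List.drop_nil, hnil, hm]
      simp only [countPrefixC, if_pos hmem', List.take_succ_cons, List.take_nil,
        List.drop_succ_cons, List.drop_nil, List.map_cons, List.map_nil,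
        PySem.Chars.join_nil]
      rw [dif_pos hmem']
    · have hm : mySplit s = s.takeWhile (fun c => decide (c ≠ ' ')) ::
          mySplit ((s.dropWhile (fun c => decide (c ≠ ' '))).drop 1) := by
        rw [mySplit_eq_cons s, if_neg hd]
      have hmem' : PySem.Chars.lower (s.takeWhile (fun c => decide (c ≠ ' '))) ∈ charPrefixes := hmem
      rw [ih, hm]
      simp only [countPrefixC, if_pos hmem', List.take_succ_cons, List.drop_succ_cons,
        List.map_cons]
      rw [dif_pos hmem']
  | case2 s word hmem =>
    have hmem' : PySem.Chars.lower (s.takeWhile (fun c => decide (c ≠ ' '))) ∉ charPrefixes := hmem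
    rw [splitPrefixB]
    rw [dif_neg hmem']
    have hc : countPrefixC (mySplit s) = 0 := by
      rw [mySplit_eq_cons s]
      simp only [countPrefixC]
      rw [if_neg hmem']
    rw [hc, List.take_zero, List.map_nil, List.drop_zero, join_mySplit]

-- ---- A's fold computes the same take/drop slices ----
def countPrefixS : List String → Nat
  | [] => 0
  | p :: rest => if PySem.Str.lower p ∈ ["van", "von", "de", "der", "den", "die"]
                 then countPrefixS rest + 1 else 0

lemma fln_fold_ne (parts : List String) (pre sur : List String) (h : sur ≠ []) :
    parts.foldl flnStep (pre, sur) = (pre, sur ++ parts) := by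
  induction parts generalizing sur with
  | nil => simp
  | cons p rest ih =>
    have hstep : flnStep (pre, sur) p = (pre, sur ++ [p]) := by
      unfold flnStep
      rw [if_neg (fun hc => h (List.isEmpty_iff.mp hc.1))]
    rw [List.foldl_cons, hstep, ih (sur ++ [p]) (by simp)]
    simp

lemma fln_fold_main (parts : List String) (pre : List String) :
    parts.foldl flnStep (pre, []) =
      (pre ++ (parts.take (countPrefixS parts)).map PySem.Str.lower,
       parts.drop (countPrefixS parts)) := by
  induction parts generalizing pre with
  | nil => simp
  | cons p rest ih =>
    by_cases hm : PySem.Str.lower p ∈ ["van", "von", "de", "der", "den", "die"]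
    · have hstep : flnStep (pre, []) p = (pre ++ [PySem.Str.lower p], []) := by
        unfold flnStep
        rw [if_pos ⟨rfl, hm⟩]
      rw [List.foldl_cons, hstep, ih]
      simp [countPrefixS, hm]
    · have hstep : flnStep (pre, []) p = (pre, [p]) := by
        unfold flnStep
        rw [if_neg (fun hc => hm hc.2)]
        simp
      rw [List.foldl_cons, hstep, fln_fold_ne rest pre [p] (by simp)]
      simp [countPrefixS, hm]

-- ---- bridges between the String-level (A) and List Char-level (B) views ----
lemma ofList_eq_str (x : List Char) (t : String) : String.ofList x = t ↔ x = t.toList := by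
  constructor
  · intro h; rw [← h, String.toList_ofList]
  · intro h; rw [h]; exact String.ofList_toList

lemma lower_ofList (w : List Char) :
    PySem.Str.lower (String.ofList w) = String.ofList (PySem.Chars.lower w) := by
  simp [PySem.Str.lower]

lemma prefix_test_bridge (w : List Char) :
    (PySem.Str.lower (String.ofList w) ∈ (["van", "von", "de", "der", "den", "die"] : List String)) ↔
      PySem.Chars.lower w ∈ charPrefixes := by
  rw [lower_ofList]
  simp only [List.mem_cons, List.not_mem_nil, or_false, ofList_eq_str, charPrefixes]
  rfl

lemma countPrefix_bridge (parts : List (List Char)) :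
    countPrefixS (parts.map String.ofList) = countPrefixC parts := by
  induction parts with
  | nil => rfl
  | cons w r ih =>
    simp only [List.map_cons, countPrefixS, countPrefixC, ih]
    by_cases h : PySem.Chars.lower w ∈ charPrefixes
    · rw [if_pos ((prefix_test_bridge w).mpr h), if_pos h]
    · rw [if_neg (fun hc => h ((prefix_test_bridge w).mp hc)), if_neg h]

lemma join_ofList (l : List (List Char)) :
    PySem.Str.join " " (l.map String.ofList) = String.ofList (PySem.Chars.join [' '] l) := by
  simp [PySem.Str.join, List.map_map, Function.comp_def, String.toList_ofList]

-- ===== VERDICT (by name: the statement is the Claim_ definition above) =====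
theorem format_last_name_spec : Claim_equal_format_last_name := by
  intro value _
  unfold Spec_format_last_name format_last_name format_last_name_alt
  have hsplit : (PySem.Str.split? (PySem.Str.strip value) " ").getD [] =
      (mySplit (PySem.Str.strip value).toList).map String.ofList := by
    simp only [PySem.Str.split?, PySem.Chars.split?]
    rw [show (" " : String).toList = [' '] from rfl]
    rw [splitOn_eq_mySplit]
    simp
  rw [hsplit]
  simp only [fln_fold_main, countPrefix_bridge, splitPrefixB_eq, List.nil_append,
    ← List.map_take, ← List.map_drop, List.map_map, Function.comp_def, lower_ofList,
    join_ofList, capitalize_eq]
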